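-- pv_equiv track=rewrite | github.com/AlexeyZam15/GamesPeek_site | igdb_site/games/management/commands/add_genres_themes.py | _convert_name
-- ===== SOURCE A (Python) =====
-- from typing import Dict, List, Set, Tuple, Optional
--
-- def _convert_name(name: str, genre_conversion: Dict, theme_conversion: Dict,
--                   genre_to_theme: Dict, theme_to_genre: Dict) -> Tuple[str, str, bool]:
--     """
--     Конвертирует название жанра/темы согласно правилам
--     Возвращает: (конвертированное_имя, тип, флаг_конвертации)
--     Тип: 'genre', 'theme', или None если конвертация не требуется
--     """
--     # Очищаем от лишних пробелов
--     name_clean = name.strip()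
--
--     # Проверяем точное совпадение
--     if name_clean in genre_conversion:
--         return genre_conversion[name_clean], 'genre', True
--     elif name_clean in theme_conversion:
--         return theme_conversion[name_clean], 'theme', True
--     elif name_clean in genre_to_theme:
--         return genre_to_theme[name_clean], 'theme', True
--     elif name_clean in theme_to_genre:
--         return theme_to_genre[name_clean], 'genre', True
--
--     # Проверяем без учета регистра
--     name_lower = name_clean.lower()
--     for key, value in genre_conversion.items():
--         if key.lower() == name_lower:
--             return value, 'genre', True
--     for key, value in theme_conversion.items():
--         if key.lower() == name_lower:
--             return value, 'theme', True
--     for key, value in genre_to_theme.items():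
--         if key.lower() == name_lower:
--             return value, 'theme', True
--     for key, value in theme_to_genre.items():
--         if key.lower() == name_lower:
--             return value, 'genre', True
--
--     return name_clean, None, False
-- ===== SOURCE B (Python) =====
-- def _convert_name(name, genre_conversion, theme_conversion, genre_to_theme, theme_to_genre):
--     name_clean = name.strip()
--     # one pass over all four dicts builds both indexes; setdefault keeps the
--     # FIRST occurrence in iteration order, matching the cascade's priority
--     exact = {}
--     ci = {}
--     for d, typ in ((genre_conversion, 'genre'), (theme_conversion, 'theme'),
--                    (genre_to_theme, 'theme'), (theme_to_genre, 'genre')):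
--         for key, value in d.items():
--             exact.setdefault(key, (value, typ))
--             ci.setdefault(key.lower(), (value, typ))
--     hit = exact.get(name_clean)
--     if hit is None:
--         hit = ci.get(name_clean.lower())
--     if hit is None:
--         return name_clean, None, False
--     return hit[0], hit[1], True
-- ===== Notes on version B (the rewrite author's own statement) =====
-- stated objective: alternative
-- what changed: Replaces the eight-step cascade (four exact membership tests then four case-insensitive linear scans) with a single pass that builds one exact index and one lowercase index via setdefault (first occurrence wins, preserving the cascade's priority), followed by just two lookups.
import Mathlib
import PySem

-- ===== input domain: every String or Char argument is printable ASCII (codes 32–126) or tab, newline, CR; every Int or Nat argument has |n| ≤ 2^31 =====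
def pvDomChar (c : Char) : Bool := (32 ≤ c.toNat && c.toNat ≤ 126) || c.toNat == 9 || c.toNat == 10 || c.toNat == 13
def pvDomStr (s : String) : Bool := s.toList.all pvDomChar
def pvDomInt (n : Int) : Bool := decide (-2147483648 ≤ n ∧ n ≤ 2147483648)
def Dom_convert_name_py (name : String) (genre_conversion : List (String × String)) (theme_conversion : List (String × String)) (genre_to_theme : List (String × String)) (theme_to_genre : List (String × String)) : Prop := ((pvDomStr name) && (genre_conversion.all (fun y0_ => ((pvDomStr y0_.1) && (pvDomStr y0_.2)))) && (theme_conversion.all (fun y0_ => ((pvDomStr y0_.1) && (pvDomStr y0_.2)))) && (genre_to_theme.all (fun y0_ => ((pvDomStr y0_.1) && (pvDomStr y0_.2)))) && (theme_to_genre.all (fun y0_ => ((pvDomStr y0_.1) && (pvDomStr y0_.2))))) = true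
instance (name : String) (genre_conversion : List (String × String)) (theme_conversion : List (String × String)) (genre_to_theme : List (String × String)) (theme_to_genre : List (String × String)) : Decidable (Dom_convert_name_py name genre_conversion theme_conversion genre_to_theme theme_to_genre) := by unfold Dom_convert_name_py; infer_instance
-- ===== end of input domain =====

-- B replaces A's eight-step cascade with one pass building an exact index and a lowercase index (setdefault, first wins) and then two lookups (alternative decomposition).


-- ===== PORT A =====
-- A's case-insensitive loop: first value whose key.lower() == nl (early-return for-loop)
def scanLowerA (xs : List (String × String)) (nl : String) : Option String :=
  match xs with
  | [] => none
  | (k, v) :: t => if PySem.Str.lower k = nl then some v else scanLowerA t nl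

def convert_name_py (name : String) (genre_conversion : List (String × String)) (theme_conversion : List (String × String)) (genre_to_theme : List (String × String)) (theme_to_genre : List (String × String)) : String × Option String × Bool :=
  let name_clean := PySem.Str.strip name
  let gc := PySem.Dict.ofList genre_conversion
  let tc := PySem.Dict.ofList theme_conversion
  let gt := PySem.Dict.ofList genre_to_theme
  let tg := PySem.Dict.ofList theme_to_genre
  match gc.get? name_clean with
  | some v => (v, some "genre", true)
  | none =>
  match tc.get? name_clean with
  | some v => (v, some "theme", true)
  | none =>
  match gt.get? name_clean with
  | some v => (v, some "theme", true)
  | none =>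
  match tg.get? name_clean with
  | some v => (v, some "genre", true)
  | none =>
  let name_lower := PySem.Str.lower name_clean
  match scanLowerA gc.items name_lower with
  | some v => (v, some "genre", true)
  | none =>
  match scanLowerA tc.items name_lower with
  | some v => (v, some "theme", true)
  | none =>
  match scanLowerA gt.items name_lower with
  | some v => (v, some "theme", true)
  | none =>
  match scanLowerA tg.items name_lower with
  | some v => (v, some "genre", true)
  | none => (name_clean, none, false)

-- ===== PORT B =====
-- B's inner loop body: setdefault (value, tag) into BOTH indexes (exact key, lowercase key)
def addIdx (tag : String)
    (st : PySem.Dict String (String × String) × PySem.Dict String (String × String))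
    (p : String × String) :
    PySem.Dict String (String × String) × PySem.Dict String (String × String) :=
  (st.1.setdefault p.1 (p.2, tag), st.2.setdefault (PySem.Str.lower p.1) (p.2, tag))

def convert_name_py_alt (name : String) (genre_conversion : List (String × String)) (theme_conversion : List (String × String)) (genre_to_theme : List (String × String)) (theme_to_genre : List (String × String)) : String × Option String × Bool :=
  let name_clean := PySem.Str.strip name
  let st :=
    [(PySem.Dict.ofList genre_conversion, "genre"),
     (PySem.Dict.ofList theme_conversion, "theme"),
     (PySem.Dict.ofList genre_to_theme, "theme"),
     (PySem.Dict.ofList theme_to_genre, "genre")].foldl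
      (fun st dt => dt.1.items.foldl (addIdx dt.2) st)
      (PySem.Dict.empty, PySem.Dict.empty)
  let hit := (st.1.get? name_clean).or (st.2.get? (PySem.Str.lower name_clean))
  match hit with
  | none => (name_clean, none, false)
  | some (v, t) => (v, some t, true)

-- ===== PRECONDITION & SPEC =====
def Spec_convert_name_py (name : String) (genre_conversion : List (String × String)) (theme_conversion : List (String × String)) (genre_to_theme : List (String × String)) (theme_to_genre : List (String × String)) (out : String × Option String × Bool) : Prop := out = convert_name_py_alt name genre_conversion theme_conversion genre_to_theme theme_to_genre
instance (name : String) (genre_conversion : List (String × String)) (theme_conversion : List (String × String)) (genre_to_theme : List (String × String)) (theme_to_genre : List (String × String)) (out : String × Option String × Bool) : Decidable (Spec_convert_name_py name genre_conversion theme_conversion genre_to_theme theme_to_genre out) := by unfold Spec_convert_name_py; infer_instance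

-- ===== CLAIM (what is proved, stated in full; the proofs are below) =====
def Claim_equal_convert_name_py : Prop := ∀ (name : String) (genre_conversion : List (String × String)) (theme_conversion : List (String × String)) (genre_to_theme : List (String × String)) (theme_to_genre : List (String × String)), Dom_convert_name_py name genre_conversion theme_conversion genre_to_theme theme_to_genre → Spec_convert_name_py name genre_conversion theme_conversion genre_to_theme theme_to_genre (convert_name_py name genre_conversion theme_conversion genre_to_theme theme_to_genre)

-- ===== LEMMAS AND PROOFS =====

-- proof helper: first value in xs whose key maps to k under f (f = id: exact; f = lower: CI)
def scanKey (f : String → String) (xs : List (String × String)) (k : String) : Option String :=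
  match xs with
  | [] => none
  | (a, v) :: t => if f a = k then some v else scanKey f t k

-- the two components of the pair-state fold are independent setdefault folds
lemma fold_addIdx_fst (tag : String) (xs : List (String × String))
    (st : PySem.Dict String (String × String) × PySem.Dict String (String × String)) :
    (xs.foldl (addIdx tag) st).1
      = xs.foldl (fun d p => d.setdefault p.1 (p.2, tag)) st.1 := by
  induction xs generalizing st with
  | nil => rfl
  | cons p t ih => simp [List.foldl_cons, ih, addIdx]

lemma fold_addIdx_snd (tag : String) (xs : List (String × String))
    (st : PySem.Dict String (String × String) × PySem.Dict String (String × String)) :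
    (xs.foldl (addIdx tag) st).2
      = xs.foldl (fun d p => d.setdefault (PySem.Str.lower p.1) (p.2, tag)) st.2 := by
  induction xs generalizing st with
  | nil => rfl
  | cons p t ih => simp [List.foldl_cons, ih, addIdx]

-- a setdefault fold keyed through f: lookup = old lookup `or` first matching pair
lemma get?_foldl_setdef (f : String → String) (tag : String) (xs : List (String × String))
    (d : PySem.Dict String (String × String)) (k : String) :
    (xs.foldl (fun d p => d.setdefault (f p.1) (p.2, tag)) d).get? k
      = (d.get? k).or ((scanKey f xs k).map (fun v => (v, tag))) := by
  induction xs generalizing d with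
  | nil => simp [scanKey]
  | cons p t ih =>
    obtain ⟨a, b⟩ := p
    simp only [List.foldl_cons, scanKey, ih]
    by_cases hk : f a = k
    · subst hk
      by_cases hc : d.contains (f a) = true
      · rw [PySem.Dict.setdefault_of_contains _ _ hc]
        rw [PySem.Dict.contains_eq_isSome_get?] at hc
        obtain ⟨w, hw⟩ := Option.isSome_iff_exists.mp hc
        simp [hw]
      · rw [PySem.Dict.setdefault_of_not_contains _ _ (by simpa using hc)]
        have hn : d.get? (f a) = none := by
          rw [PySem.Dict.contains_eq_isSome_get?] at hc
          simpa using hc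
        simp [PySem.Dict.get?_insert_self, hn]
    · by_cases hc : d.contains (f a) = true
      · rw [PySem.Dict.setdefault_of_contains _ _ hc]
        simp [hk]
      · rw [PySem.Dict.setdefault_of_not_contains _ _ (by simpa using hc)]
        rw [PySem.Dict.get?_insert_of_ne _ _ (fun h => hk h.symm)]
        simp [hk]

-- the lowercase scan is exactly A's case-insensitive loop
lemma scanKey_lower (xs : List (String × String)) (nl : String) :
    scanKey PySem.Str.lower xs nl = scanLowerA xs nl := by
  induction xs with
  | nil => simp [scanKey, scanLowerA]
  | cons p t ih =>
    obtain ⟨a, b⟩ := p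
    by_cases h : PySem.Str.lower a = nl <;> simp [scanKey, scanLowerA, h, ih]

-- the f = id instance of the fold lemma, in the beta-reduced form B's port shows
lemma get?_foldl_setdef_id (tag : String) (xs : List (String × String))
    (d : PySem.Dict String (String × String)) (k : String) :
    (xs.foldl (fun d p => d.setdefault p.1 (p.2, tag)) d).get? k
      = (d.get? k).or ((scanKey (fun s => s) xs k).map (fun v => (v, tag))) := by
  have h := get?_foldl_setdef (fun s => s) tag xs d k
  simpa using h

-- exact first-match over a list with nodup keys
lemma scanKey_id_of_mem {l : List (String × String)} {k v : String}
    (hm : (k, v) ∈ l) (hnd : (l.map Prod.fst).Nodup) :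
    scanKey (fun s => s) l k = some v := by
  induction l with
  | nil => simp at hm
  | cons p t ih =>
    obtain ⟨a, b⟩ := p
    simp only [List.map_cons, List.nodup_cons] at hnd
    rcases List.mem_cons.mp hm with h | h
    · cases h; simp [scanKey]
    · have hak : a ≠ k := by
        intro he; subst he
        exact hnd.1 (List.mem_map.mpr ⟨(a, v), h, rfl⟩)
      simp [scanKey, hak, ih h hnd.2]

lemma scanKey_id_of_not_mem {l : List (String × String)} {k : String}
    (h : ∀ p ∈ l, p.1 ≠ k) :
    scanKey (fun s => s) l k = none := by
  induction l with
  | nil => simp [scanKey]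
  | cons p t ih =>
    obtain ⟨a, b⟩ := p
    simp [scanKey, h (a, b) List.mem_cons_self,
      ih (fun q hq => h q (List.mem_cons_of_mem _ hq))]

-- exact first-match scan over a dict's items IS the dict lookup (keys are nodup)
lemma scanKey_id_items (d : PySem.Dict String String) (k : String)
    (hnd : d.keys.Nodup) :
    scanKey (fun s => s) d.items k = d.get? k := by
  cases hs : d.get? k with
  | some v =>
    exact scanKey_id_of_mem (PySem.Dict.mem_items_of_get?_eq_some (d := d) hs)
      (by simpa [PySem.Dict.keys] using hnd)
  | none =>
    have hnk : ¬ k ∈ d.keys := (PySem.Dict.get?_eq_none_iff_not_mem_keys d k).mp hs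
    exact scanKey_id_of_not_mem (fun p hp he =>
      hnk (by simpa [PySem.Dict.keys, ← he] using List.mem_map_of_mem (f := Prod.fst) hp))

-- ===== VERDICT (by name: the statement is the Claim_ definition above) =====

-- the abstract shape: A's eight-way cascade equals B's or-chain lookup (pure options)
lemma chain_eq (nc : String) (e1 e2 e3 e4 s1 s2 s3 s4 : Option String) :
    (match e1 with
     | some v => (v, some "genre", true)
     | none =>
     match e2 with
     | some v => (v, some "theme", true)
     | none =>
     match e3 with
     | some v => (v, some "theme", true)
     | none =>
     match e4 with
     | some v => (v, some "genre", true)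
     | none =>
     match s1 with
     | some v => (v, some "genre", true)
     | none =>
     match s2 with
     | some v => (v, some "theme", true)
     | none =>
     match s3 with
     | some v => (v, some "theme", true)
     | none =>
     match s4 with
     | some v => (v, some "genre", true)
     | none => (nc, none, false) : String × Option String × Bool)
    = (match Option.or
        (Option.or (Option.or (Option.or (Option.or none (e1.map (fun v => (v, "genre"))))
          (e2.map (fun v => (v, "theme")))) (e3.map (fun v => (v, "theme"))))
          (e4.map (fun v => (v, "genre"))))
        (Option.or (Option.or (Option.or (Option.or none (s1.map (fun v => (v, "genre"))))
          (s2.map (fun v => (v, "theme")))) (s3.map (fun v => (v, "theme"))))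
          (s4.map (fun v => (v, "genre")))) with
       | none => (nc, none, false)
       | some (v, t) => (v, some t, true)) := by
  cases e1 <;> cases e2 <;> cases e3 <;> cases e4 <;>
    cases s1 <;> cases s2 <;> cases s3 <;> cases s4 <;> rfl

theorem convert_name_py_spec : Claim_equal_convert_name_py := by
  intro name gc0 tc0 gt0 tg0 _
  unfold Spec_convert_name_py convert_name_py convert_name_py_alt
  simp only [List.foldl_cons, List.foldl_nil, fold_addIdx_fst, fold_addIdx_snd,
    get?_foldl_setdef, get?_foldl_setdef_id, scanKey_lower,
    scanKey_id_items _ _ (PySem.Dict.nodup_keys_ofList _),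
    PySem.Dict.get?_empty]
  exact chain_eq _ _ _ _ _ _ _ _ _
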